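-- pv_equiv track=rewrite | github.com/DanielYyork/polymer_experiments | polymer_md/functions/smiles2pdb.py | generate_unique_residue_code
-- ===== SOURCE A (Python) =====
-- import itertools
--
-- def generate_unique_residue_code(residue_codes, forbidden_codes=None):
--     # Generate a unique 3-letter residue code not already in the database and not in the forbidden codes list
--     existing_codes = set(entry[2] for entry in residue_codes)  # Assuming code is the third column
--     forbidden_codes = set(forbidden_codes) if forbidden_codes else set()
--
--     # Generate all possible combinations of three letters
--     all_combinations = [''.join(combination) for combination in itertools.product('ABCDEFGHIJKLMNOPQRSTUVWXYZ', repeat=3)]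
--
--     # Find the first unused code not in the forbidden codes list
--     new_code = next((code for code in all_combinations if code not in existing_codes and code not in forbidden_codes), None)
--
--     if new_code is None:
--         raise ValueError("Unable to generate a unique residue code.")
--
--     return new_code
-- ===== SOURCE B (Python) =====
-- def generate_unique_residue_code(residue_codes, forbidden_codes=None):
--     # Set difference over the whole code space, then take the lexicographic minimum.
--     letters = 'ABCDEFGHIJKLMNOPQRSTUVWXYZ'
--     all_codes = {a + b + c for a in letters for b in letters for c in letters}
--     remaining = all_codes - {entry[2] for entry in residue_codes} - set(forbidden_codes or ())
--     if not remaining: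
--         raise ValueError("Unable to generate a unique residue code.")
--     return min(remaining)
-- ===== Notes on version B (the rewrite author's own statement) =====
-- stated objective: alternative
-- what changed: B replaces A's ordered linear scan with early exit over itertools.product by building the full 17576-code set and returning the lexicographic minimum of the set difference all_codes - existing - forbidden.
import Mathlib
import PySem

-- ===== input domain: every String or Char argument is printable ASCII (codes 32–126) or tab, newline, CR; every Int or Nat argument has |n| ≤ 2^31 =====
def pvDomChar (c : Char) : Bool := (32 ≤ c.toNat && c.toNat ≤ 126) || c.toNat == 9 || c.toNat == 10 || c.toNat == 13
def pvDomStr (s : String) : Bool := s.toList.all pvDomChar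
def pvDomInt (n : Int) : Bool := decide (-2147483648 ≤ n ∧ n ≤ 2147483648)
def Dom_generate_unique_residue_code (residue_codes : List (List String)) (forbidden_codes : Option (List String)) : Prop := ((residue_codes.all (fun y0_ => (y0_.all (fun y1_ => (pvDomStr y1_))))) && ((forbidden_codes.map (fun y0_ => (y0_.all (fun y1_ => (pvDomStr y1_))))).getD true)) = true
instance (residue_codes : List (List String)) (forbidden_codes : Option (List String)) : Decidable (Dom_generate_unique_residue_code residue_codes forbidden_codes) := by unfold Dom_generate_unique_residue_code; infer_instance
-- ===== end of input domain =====

-- B replaces A's ordered linear scan with early exit by a set difference over the whole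
-- code space followed by a lexicographic minimum (objective: alternative decomposition).

-- the 26 uppercase letters and the 17576 three-letter codes, in itertools.product order
def pvLetters : List Char := "ABCDEFGHIJKLMNOPQRSTUVWXYZ".toList
def pvAllCodes : List String :=
  pvLetters.flatMap (fun a => pvLetters.flatMap (fun b => pvLetters.map (fun c => String.ofList [a, b, c])))

-- ===== PORT A =====
def generate_unique_residue_code (residue_codes : List (List String)) (forbidden_codes : Option (List String)) : String :=
  let existing_codes : PySem.Set String :=
    PySem.Set.ofList (residue_codes.map (fun entry => (PySem.List.pyGet? entry 2).getD ""))
  -- `set(forbidden_codes) if forbidden_codes else set()` (None and [] are both falsy)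
  let forbidden : PySem.Set String :=
    match forbidden_codes with
    | some l => if l.isEmpty then PySem.Set.empty else PySem.Set.ofList l
    | none => PySem.Set.empty
  let all_combinations : List String := pvAllCodes
  match all_combinations.find? (fun code =>
      !(PySem.Set.contains existing_codes code) && !(PySem.Set.contains forbidden code)) with
  | some code => code
  | none => ""  -- `raise ValueError(...)`: excluded by Pre_

-- ===== PORT B =====
def generate_unique_residue_code_alt (residue_codes : List (List String)) (forbidden_codes : Option (List String)) : String :=
  let all_codes : PySem.Set String := PySem.Set.ofList pvAllCodes
  let existing : PySem.Set String :=
    PySem.Set.ofList (residue_codes.map (fun entry => (PySem.List.pyGet? entry 2).getD ""))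
  -- `all_codes - {entry[2] ...} - set(forbidden_codes or ())`
  let remaining : PySem.Set String :=
    PySem.Set.diff (PySem.Set.diff all_codes existing) (PySem.Set.ofList (forbidden_codes.getD []))
  if remaining.isEmpty then ""  -- `raise ValueError(...)`: excluded by Pre_
  else (PySem.List.min? remaining (fun x => x)).getD ""

-- ===== PRECONDITION & SPEC =====
-- Pre_ excludes exactly the inputs on which A raises: an entry shorter than 3 (IndexError
-- on entry[2]) and the pathological exhaustion case where every one of the 17576 codes is
-- already used or forbidden (ValueError).
def Pre_generate_unique_residue_code (residue_codes : List (List String)) (forbidden_codes : Option (List String)) : Prop :=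
  (∀ entry ∈ residue_codes, 2 < entry.length) ∧
  (∃ c ∈ pvAllCodes, c ∉ residue_codes.map (fun entry => (PySem.List.pyGet? entry 2).getD "") ∧ c ∉ forbidden_codes.getD [])
instance (residue_codes : List (List String)) (forbidden_codes : Option (List String)) : Decidable (Pre_generate_unique_residue_code residue_codes forbidden_codes) := by unfold Pre_generate_unique_residue_code; infer_instance

def pvWitness_generate_unique_residue_code : List (List String) × Option (List String) :=
  ([["N", "CA", "AAA"], ["N", "CA", "LIG"]], some ["AAB"])

def Spec_generate_unique_residue_code (residue_codes : List (List String)) (forbidden_codes : Option (List String)) (out : String) : Prop := out = generate_unique_residue_code_alt residue_codes forbidden_codes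
instance (residue_codes : List (List String)) (forbidden_codes : Option (List String)) (out : String) : Decidable (Spec_generate_unique_residue_code residue_codes forbidden_codes out) := by unfold Spec_generate_unique_residue_code; infer_instance

-- ===== CLAIM (what is proved, stated in full; the proofs are below) =====
def Claim_equal_generate_unique_residue_code : Prop := ∀ (residue_codes : List (List String)) (forbidden_codes : Option (List String)), Dom_generate_unique_residue_code residue_codes forbidden_codes → Pre_generate_unique_residue_code residue_codes forbidden_codes → Spec_generate_unique_residue_code residue_codes forbidden_codes (generate_unique_residue_code residue_codes forbidden_codes)

-- ===== LEMMAS AND PROOFS =====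

lemma pvLetters_sorted : pvLetters.Pairwise (· < ·) := by decide

lemma pvStr3_lt_1 (a b c a' b' c' : Char) (h : a < a') :
    String.ofList [a, b, c] < String.ofList [a', b', c'] := by
  rw [String.lt_iff_toList_lt]; simp only [String.toList_ofList]
  exact (List.lt_iff_lex_lt _ _).mpr (List.Lex.rel h)

lemma pvStr3_lt_2 (a b c b' c' : Char) (h : b < b') :
    String.ofList [a, b, c] < String.ofList [a, b', c'] := by
  rw [String.lt_iff_toList_lt]; simp only [String.toList_ofList]
  exact (List.lt_iff_lex_lt _ _).mpr (List.Lex.cons (List.Lex.rel h))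

lemma pvStr3_lt_3 (a b c c' : Char) (h : c < c') :
    String.ofList [a, b, c] < String.ofList [a, b, c'] := by
  rw [String.lt_iff_toList_lt]; simp only [String.toList_ofList]
  exact (List.lt_iff_lex_lt _ _).mpr (List.Lex.cons (List.Lex.cons (List.Lex.rel h)))

lemma pvAllCodes_sorted : pvAllCodes.Pairwise (· < ·) := by
  unfold pvAllCodes
  rw [List.pairwise_flatMap]
  refine ⟨fun a _ => ?_, ?_⟩
  · rw [List.pairwise_flatMap]
    refine ⟨fun b _ => ?_, ?_⟩
    · rw [List.pairwise_map]
      exact pvLetters_sorted.imp (fun h => pvStr3_lt_3 _ _ _ _ h)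
    · refine pvLetters_sorted.imp (fun h => ?_)
      intro x hx y hy
      simp only [List.mem_map] at hx hy
      obtain ⟨c, _, rfl⟩ := hx; obtain ⟨c', _, rfl⟩ := hy
      exact pvStr3_lt_2 _ _ _ _ _ h
  · refine pvLetters_sorted.imp (fun h => ?_)
    intro x hx y hy
    simp only [List.mem_flatMap, List.mem_map] at hx hy
    obtain ⟨b, _, c, _, rfl⟩ := hx; obtain ⟨b', _, c', _, rfl⟩ := hy
    exact pvStr3_lt_1 _ _ _ _ _ _ h

-- in a ≤-sorted list, the first element satisfying p is ≤ every element satisfying p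
lemma pv_find?_le {l : List String} (hl : l.Pairwise (· ≤ ·)) {p : String → Bool} {c : String}
    (h : l.find? p = some c) : ∀ y ∈ l, p y = true → c ≤ y := by
  induction l with
  | nil => simp at h
  | cons x t ih =>
    rw [List.pairwise_cons] at hl
    intro y hy hpy
    cases hpx : p x with
    | true =>
      rw [List.find?_cons_of_pos hpx, Option.some.injEq] at h
      subst h
      rcases List.mem_cons.mp hy with rfl | hyt
      · exact le_refl _
      · exact hl.1 y hyt
    | false =>
      rw [List.find?_cons_of_neg (by simp [hpx])] at h
      rcases List.mem_cons.mp hy with rfl | hyt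
      · rw [hpx] at hpy; cases hpy
      · exact ih hl.2 h y hyt hpy

lemma pv_forb_eq (forbidden_codes : Option (List String)) :
    (match forbidden_codes with
      | some l => if l.isEmpty then PySem.Set.empty else PySem.Set.ofList l
      | none => (PySem.Set.empty : PySem.Set String)) = PySem.Set.ofList (forbidden_codes.getD []) := by
  cases forbidden_codes with
  | none => rfl
  | some l => cases l <;> rfl

lemma pv_core (exL fbL : List String) :
    (match pvAllCodes.find? (fun code =>
        !(PySem.Set.contains (PySem.Set.ofList exL) code) &&
        !(PySem.Set.contains (PySem.Set.ofList fbL) code)) with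
      | some code => code
      | none => "") =
    (if ((PySem.Set.diff (PySem.Set.diff (PySem.Set.ofList pvAllCodes)
        (PySem.Set.ofList exL)) (PySem.Set.ofList fbL)) : List String).isEmpty then ""
     else (PySem.List.min? (PySem.Set.diff (PySem.Set.diff (PySem.Set.ofList pvAllCodes)
        (PySem.Set.ofList exL)) (PySem.Set.ofList fbL)) (fun x => x)).getD "") := by
  have hpiff : ∀ y : String, (!(PySem.Set.contains (PySem.Set.ofList exL) y) &&
      !(PySem.Set.contains (PySem.Set.ofList fbL) y)) = true ↔ (y ∉ exL ∧ y ∉ fbL) := by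
    intro y
    simp
  have hrem : ∀ y : String,
      (y ∈ PySem.Set.diff (PySem.Set.diff (PySem.Set.ofList pvAllCodes) (PySem.Set.ofList exL))
          (PySem.Set.ofList fbL)) ↔ (y ∈ pvAllCodes ∧ y ∉ exL ∧ y ∉ fbL) := by
    intro y
    rw [PySem.Set.mem_diff, PySem.Set.mem_diff, PySem.Set.mem_ofList, PySem.Set.mem_ofList,
      PySem.Set.mem_ofList, and_assoc]
  cases hfind : pvAllCodes.find? (fun code =>
      !(PySem.Set.contains (PySem.Set.ofList exL) code) &&
      !(PySem.Set.contains (PySem.Set.ofList fbL) code)) with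
  | none =>
    have hall := List.find?_eq_none.mp hfind
    have hnil : PySem.Set.diff (PySem.Set.diff (PySem.Set.ofList pvAllCodes)
        (PySem.Set.ofList exL)) (PySem.Set.ofList fbL) = [] := by
      rw [List.eq_nil_iff_forall_not_mem]
      intro y hy
      obtain ⟨hy1, hy2⟩ := (hrem y).mp hy
      exact hall y hy1 ((hpiff y).mpr hy2)
    rw [hnil]
    rfl
  | some c =>
    have hcmem : c ∈ pvAllCodes := List.mem_of_find?_eq_some hfind
    have hb := List.find?_some (p := fun code => !(PySem.Set.contains (PySem.Set.ofList exL) code) &&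
        !(PySem.Set.contains (PySem.Set.ofList fbL) code)) hfind
    have hpc := (hpiff c).mp hb
    have hcleast := pv_find?_le (pvAllCodes_sorted.imp (fun h => le_of_lt h)) hfind
    have hcrem : c ∈ PySem.Set.diff (PySem.Set.diff (PySem.Set.ofList pvAllCodes)
        (PySem.Set.ofList exL)) (PySem.Set.ofList fbL) := (hrem c).mpr ⟨hcmem, hpc⟩
    have hne : ((PySem.Set.diff (PySem.Set.diff (PySem.Set.ofList pvAllCodes)
        (PySem.Set.ofList exL)) (PySem.Set.ofList fbL)) : List String).isEmpty = false := by
      rw [List.isEmpty_eq_false_iff_exists_mem]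
      exact ⟨c, hcrem⟩
    cases hmin : PySem.List.min? (PySem.Set.diff (PySem.Set.diff (PySem.Set.ofList pvAllCodes)
        (PySem.Set.ofList exL)) (PySem.Set.ofList fbL)) (fun x => x) with
    | none =>
      rw [PySem.List.min?_eq_none_iff] at hmin
      rw [hmin] at hcrem
      cases hcrem
    | some m =>
      have hmmem := PySem.List.min?_mem hmin
      obtain ⟨hm1, hm2⟩ := (hrem m).mp hmmem
      have h1 : c ≤ m := hcleast m hm1 ((hpiff m).mpr hm2)
      have h2 : m ≤ c := PySem.List.min?_isMin hmin c hcrem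
      rw [hne]
      show c = m
      exact le_antisymm h1 h2

set_option maxRecDepth 100000 in
lemma pv_main (residue_codes : List (List String)) (forbidden_codes : Option (List String)) :
    generate_unique_residue_code residue_codes forbidden_codes
      = generate_unique_residue_code_alt residue_codes forbidden_codes := by
  simp only [generate_unique_residue_code, generate_unique_residue_code_alt]
  rw [pv_forb_eq]
  exact pv_core (residue_codes.map (fun entry => (PySem.List.pyGet? entry 2).getD ""))
    (forbidden_codes.getD [])

-- ===== VERDICT (by name: the statement is the Claim_ definition above) =====
theorem generate_unique_residue_code_spec : Claim_equal_generate_unique_residue_code := by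
  intro residue_codes forbidden_codes _ _
  unfold Spec_generate_unique_residue_code
  exact pv_main residue_codes forbidden_codes
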